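-- pv_equiv track=rewrite | github.com/devYuMinKim/Coding_Test_with_JavaScript | 20220907/모범답안/20220907_04.js/cardGame.py | solution
-- ===== SOURCE A (Python) =====
-- def solution(A):
--     A.sort()
--     answer = 0
--     length = len(A)
--     while length > 0:
--         if length % 2 == 1:
--             answer += (length * A[-1])
--             A.remove(A[-1])
--         else:
--             answer += (length * A[0] * -1)
--             A.remove(A[0])
--         length -= 1
--
--     return answer
-- ===== SOURCE B (Python) =====
-- def solution(A):
--     # Two-pointer scan over a sorted copy instead of repeated list.remove (no O(n) deletions).
--     s = sorted(A)
--     lo, hi = 0, len(s) - 1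
--     ans = 0
--     length = len(s)
--     while lo <= hi:
--         if length % 2 == 1:
--             ans += length * s[hi]
--             hi -= 1
--         else:
--             ans -= length * s[lo]
--             lo += 1
--         length -= 1
--     return ans
-- ===== Notes on version B (the rewrite author's own statement) =====
-- stated objective: faster
-- what changed: B sorts once and walks the sorted copy with two index pointers (hi for odd lengths, lo for even) instead of A's repeated O(n) list.remove on a shrinking list; B also does not mutate the argument.
import Mathlib
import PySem

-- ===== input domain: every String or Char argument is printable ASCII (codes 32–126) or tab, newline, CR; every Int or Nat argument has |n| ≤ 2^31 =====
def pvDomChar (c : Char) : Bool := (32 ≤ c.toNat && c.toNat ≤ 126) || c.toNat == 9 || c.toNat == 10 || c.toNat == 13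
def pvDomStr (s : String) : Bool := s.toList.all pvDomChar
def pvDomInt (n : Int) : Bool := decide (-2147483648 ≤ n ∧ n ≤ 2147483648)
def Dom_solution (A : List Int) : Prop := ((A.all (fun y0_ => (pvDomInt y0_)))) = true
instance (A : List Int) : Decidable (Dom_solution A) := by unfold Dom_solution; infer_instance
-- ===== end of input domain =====

-- B replaces A's repeated list.remove with a two-pointer scan over one sorted copy (asymptotically faster).
-- Note: Python A sorts and empties its argument in place; the equivalence proved here is about the return value only (B does not mutate).

-- ===== PORT A =====
-- A's while loop: fuel = length (decremented by 1 each iteration, loop runs while length > 0).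
def solutionLoop : Nat → List Int → Int → Int
  | 0, _, ans => ans
  | k+1, xs, ans =>
    if ((k : Int) + 1) % 2 == 1 then
      let v := (PySem.List.pyGet? xs (-1)).getD 0
      solutionLoop k ((PySem.List.remove? xs v).getD []) (ans + ((k : Int) + 1) * v)
    else
      let v := (PySem.List.pyGet? xs 0).getD 0
      solutionLoop k ((PySem.List.remove? xs v).getD []) (ans + ((k : Int) + 1) * v * (-1))

def solution (A : List Int) : Int :=
  let s := PySem.List.sorted A (fun x => x) false
  solutionLoop s.length s 0

-- ===== PORT B =====
-- B's while loop: fuel = length (= hi - lo + 1 throughout, loop runs while lo ≤ hi).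
def solutionAltLoop (s : List Int) : Nat → Int → Int → Int → Int
  | 0, _, _, ans => ans
  | k+1, lo, hi, ans =>
    if ((k : Int) + 1) % 2 == 1 then
      solutionAltLoop s k lo (hi - 1) (ans + ((k : Int) + 1) * (PySem.List.pyGet? s hi).getD 0)
    else
      solutionAltLoop s k (lo + 1) hi (ans - ((k : Int) + 1) * (PySem.List.pyGet? s lo).getD 0)

def solution_alt (A : List Int) : Int :=
  let s := PySem.List.sorted A (fun x => x) false
  solutionAltLoop s s.length 0 ((s.length : Int) - 1) 0

-- ===== PRECONDITION & SPEC =====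
def Spec_solution (A : List Int) (out : Int) : Prop := out = solution_alt A
instance (A : List Int) (out : Int) : Decidable (Spec_solution A out) := by unfold Spec_solution; infer_instance

-- ===== CLAIM (what is proved, stated in full; the proofs are below) =====
def Claim_equal_solution : Prop := ∀ (A : List Int), Dom_solution A → Spec_solution A (solution A)

-- ===== LEMMAS AND PROOFS =====

-- In a sorted list every element is ≤ the last element.
theorem le_getLast_of_sorted : ∀ (t : List Int) (h : t ≠ []), t.Pairwise (· ≤ ·) →
    ∀ z ∈ t, z ≤ t.getLast h := by
  intro t
  induction t with
  | nil => simp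
  | cons x t' ih =>
    intro h hp z hz
    cases t' with
    | nil =>
      simp only [List.mem_singleton] at hz
      simp [hz, List.getLast]
    | cons y t'' =>
      rw [List.getLast_cons (by simp)]
      rcases List.mem_cons.mp hz with hzx | hzm
      · subst hzx
        exact (List.pairwise_cons.mp hp).1 _ (List.getLast_mem _)
      · exact ih (by simp) (List.pairwise_cons.mp hp).2 z hzm

-- Removing the first occurrence of the last element of a sorted list equals dropping the last element.
theorem remove_getLast_of_sorted : ∀ (t : List Int) (h : t ≠ []), t.Pairwise (· ≤ ·) →
    PySem.List.remove? t (t.getLast h) = some t.dropLast := by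
  intro t
  induction t with
  | nil => intro h; simp at h
  | cons x t' ih =>
    intro h hp
    cases t' with
    | nil => simp [List.getLast]
    | cons y t'' =>
      rw [List.getLast_cons (by simp)]
      by_cases hxg : x = (y :: t'').getLast (by simp)
      · have hall : ∀ z ∈ y :: t'', z = x := by
          intro z hz
          have h1 : x ≤ z := (List.pairwise_cons.mp hp).1 z hz
          have h2 : z ≤ (y :: t'').getLast (by simp) :=
            le_getLast_of_sorted (y :: t'') (by simp) (List.pairwise_cons.mp hp).2 z hz
          omega
        rw [← hxg, PySem.List.remove?_cons_self]
        have e1 : y :: t'' = List.replicate (t''.length + 1) x := by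
          have := List.eq_replicate_of_mem (l := y :: t'') (a := x) hall
          simpa using this
        have e2 : (y :: t'').dropLast = List.replicate t''.length x := by
          rw [e1, List.replicate_succ', List.dropLast_concat]
        rw [List.dropLast_cons₂, e2, e1, List.replicate_succ]
      · rw [PySem.List.remove?_cons_of_ne (y :: t'') hxg,
            ih (by simp) (List.pairwise_cons.mp hp).2, List.dropLast_cons₂]
        rfl

-- Main loop correspondence: A's loop on the window s[lo : lo+k] equals B's loop with pointers lo, lo+k-1.
theorem loop_eq (s : List Int) (hs : s.Pairwise (· ≤ ·)) :
    ∀ (k lo : Nat) (ans : Int), lo + k ≤ s.length →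
      solutionLoop k ((s.drop lo).take k) ans
        = solutionAltLoop s k (lo : Int) ((lo : Int) + (k : Int) - 1) ans := by
  intro k
  induction k with
  | zero => intro lo ans _; simp [solutionLoop, solutionAltLoop]
  | succ k ih =>
    intro lo ans hle
    have hlt : lo + k < s.length := by omega
    have hlo : lo < s.length := by omega
    have ht_len : ((s.drop lo).take (k+1)).length = k + 1 := by
      simp [List.length_take, List.length_drop]; omega
    have ht_ne : (s.drop lo).take (k+1) ≠ [] := by
      intro hc; rw [hc] at ht_len; simp at ht_len
    have ht_pair : ((s.drop lo).take (k+1)).Pairwise (· ≤ ·) :=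
      hs.sublist ((List.take_sublist _ _).trans (List.drop_sublist _ _))
    simp only [solutionLoop, solutionAltLoop]
    by_cases hpar : (((k : Int) + 1) % 2 == 1) = true
    · simp only [hpar, if_true]
      -- last element of the window is s[lo+k]
      have hlast : ((s.drop lo).take (k+1)).getLast ht_ne = s[lo+k] := by
        have h1 : ((s.drop lo).take (k+1)).getLast? = some (((s.drop lo).take (k+1)).getLast ht_ne) :=
          List.getLast?_eq_some_getLast (h := ht_ne)
        have h2 : ((s.drop lo).take (k+1)).getLast? = some s[lo+k] := by
          rw [List.getLast?_eq_getElem?, ht_len]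
          simp [List.getElem?_drop, hlt]
        rw [h1] at h2; exact (Option.some.injEq _ _).mp h2
      have hget : PySem.List.pyGet? ((s.drop lo).take (k+1)) (-1)
          = some (((s.drop lo).take (k+1)).getLast ht_ne) := by
        rw [PySem.List.pyGet?_neg_one]
        exact List.getLast?_eq_some_getLast (h := ht_ne)
      have hrem := remove_getLast_of_sorted ((s.drop lo).take (k+1)) ht_ne ht_pair
      have hdrop : ((s.drop lo).take (k+1)).dropLast = (s.drop lo).take k := by
        rw [List.dropLast_eq_take, ht_len, Nat.add_sub_cancel, List.take_take]
        simp
      have hB : PySem.List.pyGet? s ((lo : Int) + (((k : Nat) + 1 : Nat) : Int) - 1) = some s[lo+k] := by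
        have hidx : (lo : Int) + (((k : Nat) + 1 : Nat) : Int) - 1 = ((lo + k : Nat) : Int) := by
          push_cast; ring
        rw [hidx, PySem.List.pyGet?_natCast]
        simp [hlt]
      simp only [hget, Option.getD_some]
      rw [hrem]
      simp only [Option.getD_some, hdrop, hlast, hB]
      rw [ih lo (ans + ((k : Int) + 1) * s[lo+k]) (by omega)]
      congr 1
      all_goals (push_cast; ring)
    · rw [if_neg hpar, if_neg hpar]
      have ht : (s.drop lo).take (k+1) = s[lo] :: (s.drop (lo+1)).take k := by
        rw [List.drop_eq_getElem_cons hlo, List.take_succ_cons]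
      have hB : PySem.List.pyGet? s ((lo : Nat) : Int) = some s[lo] := by
        rw [PySem.List.pyGet?_natCast]; simp [hlo]
      rw [ht]
      simp only [PySem.List.pyGet?_zero_cons, Option.getD_some,
        PySem.List.remove?_cons_self, hB]
      rw [ih (lo+1) (ans + ((k : Int) + 1) * s[lo] * (-1)) (by omega)]
      congr 1
      all_goals (push_cast; ring)

-- ===== VERDICT (by name: the statement is the Claim_ definition above) =====
theorem solution_spec : Claim_equal_solution := by
  intro A _
  unfold Spec_solution solution solution_alt
  have hs : (PySem.List.sorted A (fun x => x) false).Pairwise (· ≤ ·) := by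
    simpa using PySem.List.sorted_pairwise (xs := A) (key := fun x => x)
  have h := loop_eq (PySem.List.sorted A (fun x => x) false) hs
      (PySem.List.sorted A (fun x => x) false).length 0 0 (by omega)
  have htake : List.take A.length (PySem.List.sorted A (fun x => x) false)
      = PySem.List.sorted A (fun x => x) false := by
    rw [← PySem.List.length_sorted (xs := A) (key := fun x => x) (rev := false)]
    exact List.take_length
  simpa [htake] using h
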